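-- pv_equiv track=rewrite | github.com/ycl-2004/UBC_GO_V1 | scraper/data_processing/process_detailed_requirements.py | determine_faculty_from_degree
-- ===== SOURCE A (Python) =====
-- def determine_faculty_from_degree(degree_name: str) -> str:
--     """Determine faculty from degree name"""
--     degree_lower = degree_name.lower()
--
--     if any(k in degree_lower for k in ['arts', 'ba ', 'humanities', 'social science',
--                                         'psychology', 'economics', 'english', 'history']):
--         return 'arts'
--
--     if any(k in degree_lower for k in ['science', 'bsc', 'biology', 'chemistry',
--                                         'physics', 'mathematics', 'computer science']):
--         return 'science'
--
--     if any(k in degree_lower for k in ['commerce', 'business', 'sauder', 'management']):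
--         return 'sauder'
--
--     if any(k in degree_lower for k in ['engineering', 'applied science']):
--         return 'engineering'
--
--     return 'other'
-- ===== SOURCE B (Python) =====
-- FACULTY_LABELS = ['arts', 'science', 'sauder', 'engineering', 'other']
--
-- _GROUPS = [
--     ['arts', 'ba ', 'humanities', 'social science',
--      'psychology', 'economics', 'english', 'history'],
--     ['science', 'bsc', 'biology', 'chemistry',
--      'physics', 'mathematics', 'computer science'],
--     ['commerce', 'business', 'sauder', 'management'],
--     ['engineering', 'applied science'],
-- ]
--
-- # one flat (keyword, priority) table
-- KEYWORD_RANKS = [(k, r) for r, group in enumerate(_GROUPS) for k in group]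
--
-- def determine_faculty_from_degree(degree_name: str) -> str:
--     low = degree_name.lower()
--     best = 4  # index of 'other'
--     for kw, rank in KEYWORD_RANKS:
--         if rank < best and kw in low:
--             best = rank
--     return FACULTY_LABELS[best]
-- ===== Notes on version B (the rewrite author's own statement) =====
-- stated objective: alternative
-- what changed: B replaces A's ordered early-return branch checks by a single aggregate fold over one flat (keyword, priority) table that computes the minimum matching priority, then indexes a label array by it.
import Mathlib
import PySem

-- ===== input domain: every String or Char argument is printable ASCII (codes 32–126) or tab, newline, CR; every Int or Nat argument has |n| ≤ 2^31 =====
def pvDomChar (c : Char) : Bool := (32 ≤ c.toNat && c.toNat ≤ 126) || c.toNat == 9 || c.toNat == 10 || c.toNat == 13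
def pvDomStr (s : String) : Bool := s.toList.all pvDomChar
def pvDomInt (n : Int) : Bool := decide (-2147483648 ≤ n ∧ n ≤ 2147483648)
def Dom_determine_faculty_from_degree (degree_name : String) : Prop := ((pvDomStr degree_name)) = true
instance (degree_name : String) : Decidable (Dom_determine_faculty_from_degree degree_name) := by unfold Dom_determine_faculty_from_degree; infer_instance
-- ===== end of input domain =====

-- One honest line: B folds a flat (keyword, priority) table to the minimum matching priority and indexes a label array, instead of A's ordered early-return branch checks (alternative decomposition, same cost).

-- ===== PORT A =====
def determine_faculty_from_degree (degree_name : String) : String :=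
  let degree_lower := PySem.Str.lower degree_name
  if (["arts", "ba ", "humanities", "social science",
       "psychology", "economics", "english", "history"].any
        (fun k => PySem.Str.isIn k degree_lower)) then "arts"
  else if (["science", "bsc", "biology", "chemistry",
            "physics", "mathematics", "computer science"].any
        (fun k => PySem.Str.isIn k degree_lower)) then "science"
  else if (["commerce", "business", "sauder", "management"].any
        (fun k => PySem.Str.isIn k degree_lower)) then "sauder"
  else if (["engineering", "applied science"].any
        (fun k => PySem.Str.isIn k degree_lower)) then "engineering"
  else "other"

-- ===== PORT B =====
def facultyLabels : List String := ["arts", "science", "sauder", "engineering", "other"]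

def facultyGroups : List (List String) :=
  [["arts", "ba ", "humanities", "social science",
    "psychology", "economics", "english", "history"],
   ["science", "bsc", "biology", "chemistry",
    "physics", "mathematics", "computer science"],
   ["commerce", "business", "sauder", "management"],
   ["engineering", "applied science"]]

-- KEYWORD_RANKS = [(k, r) for r, group in enumerate(_GROUPS) for k in group]
def keywordRanks : List (String × Int) :=
  (PySem.List.enumerate facultyGroups).flatMap (fun p => p.2.map (fun k => (k, p.1)))

def determine_faculty_from_degree_alt (degree_name : String) : String :=
  let low := PySem.Str.lower degree_name
  let best := keywordRanks.foldl
    (fun b p => if p.2 < b ∧ PySem.Str.isIn p.1 low then p.2 else b) 4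
  -- FACULTY_LABELS[best]: best is provably in 0..4, so pyGet? is some; .getD is exact here
  (PySem.List.pyGet? facultyLabels best).getD "other"

-- ===== PRECONDITION & SPEC =====
def Spec_determine_faculty_from_degree (degree_name : String) (out : String) : Prop := out = determine_faculty_from_degree_alt degree_name
instance (degree_name : String) (out : String) : Decidable (Spec_determine_faculty_from_degree degree_name out) := by unfold Spec_determine_faculty_from_degree; infer_instance

-- ===== CLAIM (what is proved, stated in full; the proofs are below) =====
def Claim_equal_determine_faculty_from_degree : Prop := ∀ (degree_name : String), Dom_determine_faculty_from_degree degree_name → Spec_determine_faculty_from_degree degree_name (determine_faculty_from_degree degree_name)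

-- ===== LEMMAS AND PROOFS =====

-- Folding one rank-constant segment of the keyword table takes best b to rank r
-- exactly when r < b and some keyword of the segment matches.
theorem fold_const_rank (low : String) (r : Int) (ks : List String) :
    ∀ b : Int,
      (ks.map (fun k => (k, r))).foldl
        (fun b p => if p.2 < b ∧ PySem.Str.isIn p.1 low then p.2 else b) b
      = if r < b ∧ ks.any (fun k => PySem.Str.isIn k low) then r else b := by
  induction ks with
  | nil => intro b; simp
  | cons k rest ih =>
      intro b
      simp only [List.map, List.foldl_cons, List.any_cons]
      by_cases hk : r < b ∧ PySem.Str.isIn k low = true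
      · rw [if_pos hk, ih r]
        have h1 : ¬ (r < r ∧ (rest.any (fun k => PySem.Str.isIn k low)) = true) :=
          fun h => lt_irrefl r h.1
        rw [if_neg h1,
          if_pos ⟨hk.1, by rw [Bool.or_eq_true, hk.2]; exact Or.inl rfl⟩]
      · rw [if_neg hk, ih b]
        by_cases hr : r < b
        · have hkm : PySem.Str.isIn k low = false :=
            Bool.eq_false_iff.mpr (fun h => hk ⟨hr, h⟩)
          simp only [hkm, Bool.false_or]
        · rw [if_neg (fun h => hr h.1), if_neg (fun h => hr h.1)]

theorem keywordRanks_eq :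
    keywordRanks =
      (["arts", "ba ", "humanities", "social science",
        "psychology", "economics", "english", "history"].map (fun k => (k, (0 : Int)))) ++
      (["science", "bsc", "biology", "chemistry",
        "physics", "mathematics", "computer science"].map (fun k => (k, (1 : Int)))) ++
      (["commerce", "business", "sauder", "management"].map (fun k => (k, (2 : Int)))) ++
      (["engineering", "applied science"].map (fun k => (k, (3 : Int)))) := by
  rfl

-- ===== VERDICT (by name: the statement is the Claim_ definition above) =====
theorem determine_faculty_from_degree_spec : Claim_equal_determine_faculty_from_degree := by
  intro s _
  unfold Spec_determine_faculty_from_degree determine_faculty_from_degree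
    determine_faculty_from_degree_alt
  rw [keywordRanks_eq]
  simp only [List.foldl_append, fold_const_rank]
  cases h0 : (["arts", "ba ", "humanities", "social science",
        "psychology", "economics", "english", "history"].any
          (fun k => PySem.Str.isIn k (PySem.Str.lower s))) <;>
  cases h1 : (["science", "bsc", "biology", "chemistry",
        "physics", "mathematics", "computer science"].any
          (fun k => PySem.Str.isIn k (PySem.Str.lower s))) <;>
  cases h2 : (["commerce", "business", "sauder", "management"].any
          (fun k => PySem.Str.isIn k (PySem.Str.lower s))) <;>
  cases h3 : (["engineering", "applied science"].any
          (fun k => PySem.Str.isIn k (PySem.Str.lower s))) <;>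
  simp [h0, h1, h2, h3, facultyLabels, PySem.List.pyGet?, PySem.List.pyIdx?]
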